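-- pv_equiv track=rewrite | github.com/MauroPatrizio/UTN | Primer-Semestre/Programacion1/TP8/functions.py | is_power_of
-- ===== SOURCE A (Python) =====
-- def is_power_of(n, b):
--     if n == 1:
--         return True
--     elif n<b:
--         return False
--     elif n % b == 0:
--         return is_power_of(n // b, b)
--     return False
-- ===== SOURCE B (Python) =====
-- def is_power_of(n, b):
--     # Ascending-powers test: multiply up from b instead of recursively dividing n down.
--     if n == 1:
--         return True
--     if -2 < b < 2:
--         return n == b
--     p = b
--     while abs(p) < abs(n):
--         p *= b
--     return p == n
-- ===== Notes on version B (the rewrite author's own statement) =====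
-- stated objective: alternative
-- what changed: replaced A's descending divide-and-recurse test by an ascending multiply-up loop (p = b, b^2, ... until |p| >= |n|, then compare), plus a direct table for |b| < 2
-- intended difference: for b <= -2 and n = b^k with k >= 3 (e.g. n = -8, b = -2) A returns False because its descending checks reject intermediate quotients below b, while B returns True, the intended answer since n really is a power of b — e.g. on is_power_of(-8, -2): A returns false, B returns true
import Mathlib
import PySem

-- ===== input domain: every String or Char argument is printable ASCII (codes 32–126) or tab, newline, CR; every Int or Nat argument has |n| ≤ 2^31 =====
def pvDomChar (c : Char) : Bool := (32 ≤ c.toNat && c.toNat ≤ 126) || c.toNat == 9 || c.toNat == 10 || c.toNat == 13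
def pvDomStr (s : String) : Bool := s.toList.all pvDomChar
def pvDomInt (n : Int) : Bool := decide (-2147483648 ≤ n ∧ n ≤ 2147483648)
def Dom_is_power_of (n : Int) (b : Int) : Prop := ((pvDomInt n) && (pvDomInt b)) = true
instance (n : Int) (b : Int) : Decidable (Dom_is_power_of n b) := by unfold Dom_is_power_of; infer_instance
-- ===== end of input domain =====

-- B tests "n is a power of b" by multiplying ascending powers up from b instead of A's recursive divide-down; on b ≤ -2, n = b^k, k ≥ 3 B returns True where A returns False (B's answer is the intended one). Equivalence is about return values on Pre_ (inputs where the Python A terminates without raising).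


-- ===== PORT A =====
-- A's recursion, made total with fuel; inside Pre_ the fuel n.natAbs + 2 is never exhausted.
def isPowerRecA (fuel : Nat) (n : Int) (b : Int) : Bool :=
  match fuel with
  | 0 => false
  | fuel + 1 =>
    if n == 1 then true
    else if n < b then false
    else if PySem.Int.mod n b == 0 then isPowerRecA fuel (PySem.Int.floordiv n b) b
    else false

def is_power_of (n : Int) (b : Int) : Bool := isPowerRecA (n.natAbs + 2) n b

-- ===== PORT B =====
-- B's while-loop 'while abs(p) < abs(n): p *= b' as a fuelled tail recursion; inside the
-- call sites (|b| ≥ 2) the fuel n.natAbs + 1 is never exhausted.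
def powUpB (fuel : Nat) (p : Int) (n : Int) (b : Int) : Bool :=
  match fuel with
  | 0 => false
  | fuel + 1 =>
    if p.natAbs < n.natAbs then powUpB fuel (p * b) n b
    else p == n

def is_power_of_alt (n : Int) (b : Int) : Bool :=
  if n == 1 then true
  else if -2 < b ∧ b < 2 then n == b
  else powUpB (n.natAbs + 1) b n b

-- ===== PRECONDITION & SPEC =====
-- Pre_ excludes exactly the inputs where the Python A does not return: b = 0 with 0 ≤ n, n ≠ 1
-- (ZeroDivisionError), b = 1 with n ≥ 2 (unbounded recursion), and n = 0 with b ≤ -1 (unbounded recursion).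
def Pre_is_power_of (n : Int) (b : Int) : Prop :=
  ¬(b = 0 ∧ 0 ≤ n ∧ n ≠ 1) ∧ ¬(b = 1 ∧ 2 ≤ n) ∧ ¬(n = 0 ∧ b ≤ -1)
instance (n : Int) (b : Int) : Decidable (Pre_is_power_of n b) := by unfold Pre_is_power_of; infer_instance
def pvWitness_is_power_of : Int × Int := (8, 2)

-- For b ≤ -2 and n = b^k with k ≥ 3 (e.g. n = -8, b = -2), A returns False because its descending
-- checks reject intermediate quotients below b, while B returns True — the intended answer, since
-- n really is a power of b. (The exponent bound 64 is immaterial on the stated |n| ≤ 2^31 domain.)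
def D_is_power_of (n : Int) (b : Int) : Prop :=
  b ≤ -2 ∧ ∃ k ∈ Finset.range 64, 3 ≤ k ∧ n = b ^ k
instance (n : Int) (b : Int) : Decidable (D_is_power_of n b) := by unfold D_is_power_of; infer_instance

def Spec_is_power_of (n : Int) (b : Int) (out : Bool) : Prop :=
  ¬ D_is_power_of n b → out = is_power_of_alt n b
instance (n : Int) (b : Int) (out : Bool) : Decidable (Spec_is_power_of n b out) := by
  unfold Spec_is_power_of; infer_instance

def pvDiffWitness_is_power_of : Int × Int := (-8, -2)
def pvDiffWitnessOut_is_power_of : Bool × Bool := (false, true)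

-- ===== CLAIM =====
def Claim_unchanged_is_power_of : Prop := ∀ (n : Int) (b : Int), Dom_is_power_of n b → Pre_is_power_of n b → Spec_is_power_of n b (is_power_of n b)
def Claim_changed_is_power_of : Prop := Dom_is_power_of (pvDiffWitness_is_power_of.1) (pvDiffWitness_is_power_of.2) ∧ Pre_is_power_of (pvDiffWitness_is_power_of.1) (pvDiffWitness_is_power_of.2) ∧ D_is_power_of (pvDiffWitness_is_power_of.1) (pvDiffWitness_is_power_of.2) ∧ is_power_of (pvDiffWitness_is_power_of.1) (pvDiffWitness_is_power_of.2) = pvDiffWitnessOut_is_power_of.1 ∧ is_power_of_alt (pvDiffWitness_is_power_of.1) (pvDiffWitness_is_power_of.2) = pvDiffWitnessOut_is_power_of.2 ∧ pvDiffWitnessOut_is_power_of.1 ≠ pvDiffWitnessOut_is_power_of.2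
def Claim_exact_is_power_of : Prop := ∀ (n : Int) (b : Int), Dom_is_power_of n b → Pre_is_power_of n b → D_is_power_of n b → is_power_of n b ≠ is_power_of_alt n b

-- ===== LEMMAS AND PROOFS =====

-- exact division: when b ∣ n, Python's floor division agrees with Lean's '/'.
theorem floordiv_of_dvd (n b : Int) (hb : b ≠ 0) (h : b ∣ n) :
    PySem.Int.floordiv n b = n / b := by
  have hm : PySem.Int.mod n b = 0 := (PySem.Int.mod_eq_zero_iff_dvd n b).mpr h
  have h1 : PySem.Int.floordiv n b * b + PySem.Int.mod n b = n := PySem.Int.floordiv_mul_add_mod n b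
  rw [hm, add_zero] at h1
  have h2 := Int.mul_ediv_cancel (PySem.Int.floordiv n b) hb
  rw [h1] at h2
  exact h2.symm

-- characterisation of A for base b ≥ 2: true exactly on the powers of b.
theorem recA_pos_char (fuel : Nat) (n b : Int) (hb : 2 ≤ b) (hf : n.natAbs + 1 ≤ fuel) :
    (isPowerRecA fuel n b = true ↔ ∃ k : ℕ, n = b ^ k) := by
  induction fuel generalizing n with
  | zero => omega
  | succ f ih =>
    simp only [isPowerRecA]
    by_cases h1 : n = 1
    · simp [h1]; exact ⟨0, by simp⟩
    · by_cases h2 : n < b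
      · simp [h1, h2]
        intro k hk
        cases k with
        | zero => simp at hk; omega
        | succ k' =>
          have : b ≤ b ^ (k' + 1) := le_self_pow₀ (by omega) (by omega)
          omega
      · by_cases h3 : PySem.Int.mod n b = 0
        · have hbne : b ≠ 0 := by omega
          obtain ⟨m, hmeq⟩ := (PySem.Int.mod_eq_zero_iff_dvd n b).mp h3
          have hfloor : PySem.Int.floordiv n b = m := by
            rw [floordiv_of_dvd n b hbne ⟨m, hmeq⟩, hmeq, Int.mul_ediv_cancel_left _ hbne]
          have hnb : b ≤ n := by omega
          have hm0 : m ≠ 0 := by rintro rfl; simp at hmeq; omega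
          have habs : n.natAbs = b.natAbs * m.natAbs := by rw [hmeq, Int.natAbs_mul]
          have hmlt : m.natAbs < n.natAbs := by
            have e2 : 2 ≤ b.natAbs := by omega
            have e1 : 1 ≤ m.natAbs := by omega
            nlinarith
          simp [h1, h2, h3, hfloor]
          rw [ih m (by omega)]
          constructor
          · rintro ⟨k, rfl⟩
            exact ⟨k + 1, by rw [hmeq, pow_succ]; ring⟩
          · rintro ⟨k, hk⟩
            match k, hk with
            | 0, hk => simp at hk; omega
            | k + 1, hk =>
              refine ⟨k, mul_left_cancel₀ hbne ?_⟩
              rw [← hmeq, hk, pow_succ]; ring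
        · simp [h1, h2, h3]
          intro k hk
          cases k with
          | zero => simp at hk; omega
          | succ k' =>
            exact h3 ((PySem.Int.mod_eq_zero_iff_dvd n b).mpr (hk ▸ dvd_pow_self b (Nat.succ_ne_zero k')))

-- characterisation of A for base b ≤ -2 (and n ≠ 0): true exactly on {1, b, b²}.
theorem recA_neg_char (fuel : Nat) (n b : Int) (hb : b ≤ -2) (hn0 : n ≠ 0)
    (hf : n.natAbs + 2 ≤ fuel) :
    (isPowerRecA fuel n b = true ↔ (n = 1 ∨ n = b ∨ n = b ^ 2)) := by
  induction fuel generalizing n with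
  | zero => omega
  | succ f ih =>
    simp only [isPowerRecA]
    have hb2pos : 0 < b ^ 2 := by nlinarith
    by_cases h1 : n = 1
    · simp [h1]
    · by_cases h2 : n < b
      · simp [h1, h2]
        refine ⟨by omega, by omega⟩
      · by_cases h3 : PySem.Int.mod n b = 0
        · have hbne : b ≠ 0 := by omega
          obtain ⟨m, hmeq⟩ := (PySem.Int.mod_eq_zero_iff_dvd n b).mp h3
          have hfloor : PySem.Int.floordiv n b = m := by
            rw [floordiv_of_dvd n b hbne ⟨m, hmeq⟩, hmeq, Int.mul_ediv_cancel_left _ hbne]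
          have hnb : b ≤ n := by omega
          have hm0 : m ≠ 0 := by rintro rfl; simp at hmeq; exact hn0 hmeq
          have habs : n.natAbs = b.natAbs * m.natAbs := by rw [hmeq, Int.natAbs_mul]
          have hfm : m.natAbs + 2 ≤ f := by
            have e2 : 2 ≤ b.natAbs := by omega
            have e1 : 1 ≤ m.natAbs := by omega
            nlinarith
          have hb3 : b ^ 3 < b := by nlinarith
          simp [h1, h2, h3, hfloor]
          rw [ih m hm0 hfm]
          constructor
          · rintro (hm | hm | hm)
            · exact Or.inl (by rw [hmeq, hm]; ring)
            · exact Or.inr (by rw [hmeq, hm]; ring)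
            · exfalso
              have hn3 : n = b ^ 3 := by rw [hmeq, hm]; ring
              omega
          · rintro (hn | hn)
            · exact Or.inl (mul_left_cancel₀ hbne (by rw [← hmeq, hn]; ring))
            · exact Or.inr (Or.inl (mul_left_cancel₀ hbne (by rw [← hmeq, hn]; ring)))
        · simp [h1, h2, h3]
          refine ⟨fun h => h3 ?_, fun h => h3 ?_⟩
          · rw [h]; exact (PySem.Int.mod_eq_zero_iff_dvd b b).mpr dvd_rfl
          · rw [h]; exact (PySem.Int.mod_eq_zero_iff_dvd _ b).mpr (dvd_pow_self b (by norm_num))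

-- characterisation of B's ascending loop for |b| ≥ 2: at state p = b^j it accepts exactly
-- the powers b^k with k ≥ j.
theorem powUpB_char (fuel : Nat) (j : Nat) (n b : Int) (hb : 2 ≤ b.natAbs) (hj : 1 ≤ j)
    (hf : n.natAbs + 1 ≤ fuel + j) :
    (powUpB fuel (b ^ j) n b = true ↔ ∃ k : ℕ, j ≤ k ∧ n = b ^ k) := by
  induction fuel generalizing j with
  | zero =>
    simp only [powUpB]
    constructor
    · intro h; cases h
    · rintro ⟨k, hk, rfl⟩
      exfalso
      have h1 : (b ^ k).natAbs = b.natAbs ^ k := Int.natAbs_pow b k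
      have h2 : 2 ^ k ≤ b.natAbs ^ k := Nat.pow_le_pow_left hb k
      have h3 : k < 2 ^ k := Nat.lt_two_pow_self
      omega
  | succ f ih =>
    simp only [powUpB]
    by_cases hlt : (b ^ j).natAbs < n.natAbs
    · rw [if_pos hlt]
      have hstep : b ^ j * b = b ^ (j + 1) := (pow_succ b j).symm
      rw [hstep, ih (j + 1) (by omega) (by omega)]
      constructor
      · rintro ⟨k, hk, rfl⟩; exact ⟨k, by omega, rfl⟩
      · rintro ⟨k, hk, rfl⟩
        refine ⟨k, ?_, rfl⟩
        rcases Nat.eq_or_lt_of_le hk with rfl | h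
        · omega
        · omega
    · rw [if_neg hlt]
      simp only [beq_iff_eq]
      constructor
      · intro h; exact ⟨j, le_refl j, h.symm⟩
      · rintro ⟨k, hk, rfl⟩
        rcases Nat.eq_or_lt_of_le hk with rfl | h
        · rfl
        · exfalso
          have h1 : (b ^ k).natAbs = b.natAbs ^ k := Int.natAbs_pow b k
          have h2 : (b ^ j).natAbs = b.natAbs ^ j := Int.natAbs_pow b j
          have h3 : b.natAbs ^ (j + 1) ≤ b.natAbs ^ k := Nat.pow_le_pow_right (by omega) h
          have h4 : b.natAbs ^ j * 2 ≤ b.natAbs ^ j * b.natAbs := by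
            exact Nat.mul_le_mul_left _ hb
          have h5 : b.natAbs ^ j * b.natAbs = b.natAbs ^ (j + 1) := (pow_succ _ _).symm
          have h6 : 0 < b.natAbs ^ j := Nat.pow_pos (by omega)
          omega

-- characterisation of B for |b| ≥ 2.
theorem altB_char (n b : Int) (hb : 2 ≤ b.natAbs) :
    (is_power_of_alt n b = true ↔ n = 1 ∨ ∃ k : ℕ, 1 ≤ k ∧ n = b ^ k) := by
  unfold is_power_of_alt
  by_cases h1 : n = 1
  · simp [h1]
  · rw [if_neg (by simp [h1]), if_neg (by omega : ¬(-2 < b ∧ b < 2))]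
    have hch := powUpB_char (n.natAbs + 1) 1 n b hb (le_refl 1) (by omega)
    rw [pow_one] at hch
    rw [hch]
    simp [h1]

-- A for base -1 (n ≠ 0): true exactly on {1, -1}.
theorem recA_negone_char (fuel : Nat) (n : Int) (hn0 : n ≠ 0) (hf : n.natAbs + 2 ≤ fuel) :
    (isPowerRecA fuel n (-1) = true ↔ (n = 1 ∨ n = -1)) := by
  obtain ⟨f, rfl⟩ : ∃ f, fuel = f + 2 := ⟨fuel - 2, by omega⟩
  by_cases h1 : n = 1
  · simp [h1, isPowerRecA]
  · by_cases h2 : n < -1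
    · simp [isPowerRecA, h1, h2]
      omega
    · have hn : 2 ≤ n ∨ n = -1 := by omega
      rcases hn with hn | rfl
      · obtain ⟨g, rfl⟩ : ∃ g, f = g + 1 := ⟨f - 1, by omega⟩
        have h3 : PySem.Int.mod n (-1) = 0 :=
          (PySem.Int.mod_eq_zero_iff_dvd n (-1)).mpr ⟨-n, by ring⟩
        have h4 : PySem.Int.floordiv n (-1) = -n := by
          rw [floordiv_of_dvd n (-1) (by omega) ⟨-n, by ring⟩]; omega
        have e1 : ¬(-n = 1) := by omega
        have e2 : -n < -1 := by omega
        simp [isPowerRecA, h1, h2, h3, h4, e1, e2]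
        omega
      · have h3 : PySem.Int.mod (-1) (-1) = 0 :=
          (PySem.Int.mod_eq_zero_iff_dvd (-1) (-1)).mpr dvd_rfl
        have h4 : PySem.Int.floordiv (-1) (-1) = 1 := by
          rw [floordiv_of_dvd (-1) (-1) (by omega) dvd_rfl]; decide
        simp [isPowerRecA, h3, h4]

-- ===== VERDICT =====
theorem is_power_of_spec : Claim_unchanged_is_power_of := by
  intro n b hDom hPre hD
  have hDom' : -2147483648 ≤ n ∧ n ≤ 2147483648 ∧ -2147483648 ≤ b ∧ b ≤ 2147483648 := by
    unfold Dom_is_power_of pvDomInt at hDom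
    simp at hDom
    omega
  obtain ⟨hPre1, hPre2, hPre3⟩ := hPre
  rw [Bool.eq_iff_iff]
  unfold is_power_of
  by_cases hbpos : 2 ≤ b
  · -- b ≥ 2: both sides are "n is a power of b"
    rw [recA_pos_char (n.natAbs + 2) n b hbpos (by omega)]
    rw [altB_char n b (by omega)]
    constructor
    · rintro ⟨k, rfl⟩
      cases k with
      | zero => left; simp
      | succ k' => right; exact ⟨k' + 1, by omega, rfl⟩
    · rintro (rfl | ⟨k, _, rfl⟩)
      · exact ⟨0, by simp⟩
      · exact ⟨k, rfl⟩
  · by_cases hbneg : b ≤ -2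
    · -- b ≤ -2: A accepts {1, b, b²}; under ¬D_ and Dom so does B
      have hn0 : n ≠ 0 := by omega
      rw [recA_neg_char (n.natAbs + 2) n b hbneg hn0 (by omega)]
      rw [altB_char n b (by omega)]
      have hD' : ¬∃ k ∈ Finset.range 64, 3 ≤ k ∧ n = b ^ k := by
        intro h; exact hD ⟨hbneg, h⟩
      constructor
      · rintro (hn | hn | hn)
        · exact Or.inl hn
        · exact Or.inr ⟨1, le_refl 1, by rw [hn, pow_one]⟩
        · exact Or.inr ⟨2, by omega, hn⟩
      · rintro (hn | ⟨k, hk1, hn⟩)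
        · exact Or.inl hn
        · match k, hk1, hn with
          | 1, _, hn => exact Or.inr (Or.inl (by rw [hn, pow_one]))
          | 2, _, hn => exact Or.inr (Or.inr hn)
          | (k + 3), _, hn =>
            exfalso
            by_cases hk64 : k + 3 < 64
            · exact hD' ⟨k + 3, Finset.mem_range.mpr hk64, by omega, hn⟩
            · have h1 : (b ^ (k + 3)).natAbs = b.natAbs ^ (k + 3) := Int.natAbs_pow b (k + 3)
              have h2 : 2 ^ 64 ≤ b.natAbs ^ (k + 3) := by
                calc 2 ^ 64 ≤ 2 ^ (k + 3) := Nat.pow_le_pow_right (by omega) (by omega)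
                  _ ≤ b.natAbs ^ (k + 3) := Nat.pow_le_pow_left (by omega) _
              have h3 : (2 : ℕ) ^ 64 = 18446744073709551616 := by norm_num
              have h4 : n.natAbs = (b ^ (k + 3)).natAbs := by rw [hn]
              omega
    · -- b ∈ {-1, 0, 1}
      interval_cases b
      · -- b = -1
        have hn0 : n ≠ 0 := by omega
        rw [recA_negone_char (n.natAbs + 2) n hn0 (by omega)]
        by_cases h1 : n = 1 <;> simp [is_power_of_alt, h1]
      · -- b = 0: Pre_ gives n < 0 ∨ n = 1
        have hn : n < 0 ∨ n = 1 := by omega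
        rcases hn with hn | rfl
        · have e1 : ¬(n = 1) := by omega
          simp [isPowerRecA, is_power_of_alt, e1, hn, show n ≠ 0 by omega]
        · simp [isPowerRecA, is_power_of_alt]
      · -- b = 1: Pre_ gives n ≤ 1
        have hn : n < 1 ∨ n = 1 := by omega
        rcases hn with hn | rfl
        · have e1 : ¬(n = 1) := by omega
          simp [isPowerRecA, is_power_of_alt, e1, hn]
        · simp [isPowerRecA, is_power_of_alt]

theorem is_power_of_changed : Claim_changed_is_power_of := by
  unfold Claim_changed_is_power_of; decide

theorem is_power_of_tight : Claim_exact_is_power_of := by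
  intro n b hDom hPre hD
  obtain ⟨hb, k, hkr, hk3, rfl⟩ := hD
  have hk2 : 2 ≤ b.natAbs := by omega
  have hn0 : b ^ k ≠ 0 := pow_ne_zero k (by omega)
  have habs : (b ^ k).natAbs = b.natAbs ^ k := Int.natAbs_pow b k
  have h8 : 8 ≤ b.natAbs ^ k := by
    calc (8 : ℕ) = 2 ^ 3 := by norm_num
      _ ≤ b.natAbs ^ 3 := Nat.pow_le_pow_left hk2 3
      _ ≤ b.natAbs ^ k := Nat.pow_le_pow_right (by omega) hk3
  have hA : is_power_of (b ^ k) b = false := by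
    rw [← Bool.not_eq_true]
    unfold is_power_of
    rw [recA_neg_char _ _ b hb hn0 (by omega)]
    rintro (h | h | h)
    · omega
    · have e1 : (b ^ k).natAbs = b.natAbs := congrArg Int.natAbs h
      have e2 : b.natAbs ^ 1 < b.natAbs ^ k := Nat.pow_lt_pow_right (by omega) (by omega)
      have e3 : b.natAbs ^ 1 = b.natAbs := pow_one _
      omega
    · have e1 : (b ^ k).natAbs = (b ^ 2).natAbs := congrArg Int.natAbs h
      have e2 : (b ^ 2).natAbs = b.natAbs ^ 2 := Int.natAbs_pow b 2
      have e3 : b.natAbs ^ 2 < b.natAbs ^ k := Nat.pow_lt_pow_right (by omega) (by omega)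
      omega
  have hB : is_power_of_alt (b ^ k) b = true := by
    rw [altB_char _ b hk2]
    right; exact ⟨k, by omega, rfl⟩
  rw [hA, hB]; simp
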